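-- pv_equiv track=rewrite | github.com/teman67/Annotation_NER_LLM_NextJS | backend/app/services/validation_service.py | apply_fixes
-- ===== SOURCE A (Python) =====
-- from typing import Dict, List, Any, Optional, Tuple
--
-- def apply_fixes(
--
--     annotations: List[Dict[str, Any]],
--     fix_indices: List[int],
--     fixed_annotations: List[Dict[str, Any]]
-- ) -> List[Dict[str, Any]]:
--     """Apply fixes to specific annotations"""
--
--     result = []
--     fix_map = {idx: fixed_annotations[i] for i, idx in enumerate(fix_indices)}
--
--     for i, annotation in enumerate(annotations):
--         if i in fix_map:
--             result.append(fix_map[i])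
--         else:
--             result.append(annotation)
--
--     return result
-- ===== SOURCE B (Python) =====
-- def apply_fixes(annotations, fix_indices, fixed_annotations):
--     """Apply fixes to specific annotations"""
--     result = list(annotations)
--     for idx, fix in zip(fix_indices, fixed_annotations):
--         if 0 <= idx < len(result):
--             result[idx] = fix
--     return result
-- ===== Notes on version B (the rewrite author's own statement) =====
-- stated objective: simpler
-- what changed: B takes a shallow copy of annotations and assigns result[idx] = fix for each pair of zip(fix_indices, fixed_annotations), eliminating A's fix_map dict and the membership-tested scan over all annotations.
-- outside the precondition, e.g. on apply_fixes([{'text': 'foo'}], [0], []): A raises IndexError, B returns [{'text': 'foo'}]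
import Mathlib
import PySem

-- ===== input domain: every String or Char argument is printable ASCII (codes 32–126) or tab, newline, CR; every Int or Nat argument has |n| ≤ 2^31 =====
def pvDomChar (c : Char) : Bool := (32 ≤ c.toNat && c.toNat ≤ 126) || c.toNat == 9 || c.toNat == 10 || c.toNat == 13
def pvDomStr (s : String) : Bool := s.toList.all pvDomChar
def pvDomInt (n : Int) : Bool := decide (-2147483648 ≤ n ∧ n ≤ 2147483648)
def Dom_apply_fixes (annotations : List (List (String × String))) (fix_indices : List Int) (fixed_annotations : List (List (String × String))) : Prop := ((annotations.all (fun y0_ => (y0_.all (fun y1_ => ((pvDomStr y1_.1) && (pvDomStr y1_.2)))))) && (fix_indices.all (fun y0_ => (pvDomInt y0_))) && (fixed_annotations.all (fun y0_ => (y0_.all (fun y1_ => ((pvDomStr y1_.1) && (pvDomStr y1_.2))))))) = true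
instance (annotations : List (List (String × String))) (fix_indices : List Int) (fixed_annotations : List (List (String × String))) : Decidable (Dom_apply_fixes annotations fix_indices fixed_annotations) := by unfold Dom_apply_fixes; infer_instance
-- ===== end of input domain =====

-- B patches a shallow copy of annotations at the given indices instead of building a fix_map dict and scanning all annotations; same return value wherever A returns.


-- ===== PORT A =====
def apply_fixes (annotations : List (List (String × String))) (fix_indices : List Int) (fixed_annotations : List (List (String × String))) : List (List (String × String)) :=
  let fix_map : PySem.Dict Int (List (String × String)) :=
    (PySem.List.enumerate fix_indices).foldl
      (fun d p => d.insert p.2 (PySem.List.pyGetD fixed_annotations p.1 [])) PySem.Dict.empty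
  (PySem.List.enumerate annotations).foldl
    (fun result p =>
      if fix_map.contains p.1 then result ++ [fix_map.getD p.1 []]
      else result ++ [p.2]) []

-- ===== PORT B =====
def apply_fixes_alt (annotations : List (List (String × String))) (fix_indices : List Int) (fixed_annotations : List (List (String × String))) : List (List (String × String)) :=
  (fix_indices.zip fixed_annotations).foldl
    (fun result p =>
      if 0 ≤ p.1 ∧ p.1 < (result.length : Int) then result.set p.1.toNat p.2 else result)
    annotations

-- ===== PRECONDITION & SPEC =====
-- A builds fix_map with fixed_annotations[i] for every position i of fix_indices, so it raises
-- IndexError exactly when fix_indices is longer than fixed_annotations; those inputs are excluded.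
def Pre_apply_fixes (annotations : List (List (String × String))) (fix_indices : List Int) (fixed_annotations : List (List (String × String))) : Prop :=
  fix_indices.length ≤ fixed_annotations.length
instance (annotations : List (List (String × String))) (fix_indices : List Int) (fixed_annotations : List (List (String × String))) : Decidable (Pre_apply_fixes annotations fix_indices fixed_annotations) := by unfold Pre_apply_fixes; infer_instance
def pvWitness_apply_fixes : (List (List (String × String))) × List Int × (List (List (String × String))) :=
  ([[("text", "foo")], [("text", "bar")]], [1], [[("text", "fix")]])

def Spec_apply_fixes (annotations : List (List (String × String))) (fix_indices : List Int) (fixed_annotations : List (List (String × String))) (out : List (List (String × String))) : Prop := out = apply_fixes_alt annotations fix_indices fixed_annotations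
instance (annotations : List (List (String × String))) (fix_indices : List Int) (fixed_annotations : List (List (String × String))) (out : List (List (String × String))) : Decidable (Spec_apply_fixes annotations fix_indices fixed_annotations out) := by unfold Spec_apply_fixes; infer_instance

-- ===== CLAIM (what is proved, stated in full; the proofs are below) =====
def Claim_equal_apply_fixes : Prop := ∀ (annotations : List (List (String × String))) (fix_indices : List Int) (fixed_annotations : List (List (String × String))), Dom_apply_fixes annotations fix_indices fixed_annotations → Pre_apply_fixes annotations fix_indices fixed_annotations → Spec_apply_fixes annotations fix_indices fixed_annotations (apply_fixes annotations fix_indices fixed_annotations)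
-- ===== LEMMAS AND PROOFS =====

-- last pair of L with first component k, if any (later entries of L win)
def lastFix {V : Type} (L : List (Int × V)) (k : Int) : Option V :=
  match L with
  | [] => none
  | p :: t =>
    match lastFix t k with
    | some v => some v
    | none => if p.1 = k then some p.2 else none

theorem get?_foldl_insert_eq_lastFix {V : Type} (L : List (Int × V)) (d : PySem.Dict Int V) (k : Int) :
    (L.foldl (fun d p => d.insert p.1 p.2) d).get? k
      = ((lastFix L k).orElse (fun _ => d.get? k)) := by
  induction L generalizing d with
  | nil => simp [lastFix, Option.orElse]
  | cons p t ih =>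
    simp only [List.foldl_cons, ih, lastFix]
    cases lastFix t k with
    | some v => simp [Option.orElse]
    | none =>
      simp only [Option.orElse, PySem.Dict.get?_insert]
      by_cases h : p.1 = k
      · simp [h]
      · rw [if_neg h, if_neg (fun hh => h hh.symm)]

theorem getElem?_foldl_set {V : Type} (L : List (Int × V)) (res : List V) (j : Nat) :
    (L.foldl (fun res p =>
      if 0 ≤ p.1 ∧ p.1 < (res.length : Int) then res.set p.1.toNat p.2 else res) res)[j]?
      = res[j]?.map (fun a => (lastFix L (j : Int)).getD a) := by
  induction L generalizing res with
  | nil => simp [lastFix]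
  | cons p t ih =>
    simp only [List.foldl_cons, lastFix]
    rw [ih]
    by_cases hg : 0 ≤ p.1 ∧ p.1 < (res.length : Int)
    · rw [if_pos hg, List.getElem?_set]
      by_cases hj : j < res.length
      · cases hlf : lastFix t (j : Int) with
        | some v =>
          by_cases hk : p.1.toNat = j <;>
            simp [hk, hj, List.getElem?_eq_getElem, hlf]
        | none =>
          by_cases hk : p.1.toNat = j
          · have hk' : p.1 = (j : Int) := by omega
            simp [hk, hj, List.getElem?_eq_getElem, hlf, hk']
          · have hk' : p.1 ≠ (j : Int) := by omega
            simp [hk, hj, List.getElem?_eq_getElem, hlf, hk']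
      · have h1 : res[j]? = none := List.getElem?_eq_none (by omega)
        by_cases hk : p.1.toNat = j <;> simp [hk, h1, hj]
    · rw [if_neg hg]
      by_cases hj : j < res.length
      · have hk' : p.1 ≠ (j : Int) := by intro h; exact hg ⟨by omega, by omega⟩
        cases hlf : lastFix t (j : Int) <;>
          simp [hlf, hj, List.getElem?_eq_getElem, hk']
      · have h1 : res[j]? = none := List.getElem?_eq_none (by omega)
        simp [h1]

theorem map_enum_eq_zip {V : Type} (fi : List Int) (fa : List V) (d0 : V)
    (h : fi.length ≤ fa.length) :
    (PySem.List.enumerate fi).map (fun p => (p.2, PySem.List.pyGetD fa p.1 d0))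
      = fi.zip fa := by
  apply List.ext_getElem
  · simp [PySem.List.length_enumerate]; omega
  · intro k h1 h2
    have hk : k < fi.length := by simpa [PySem.List.length_enumerate] using h1
    have hk2 : k < fa.length := by omega
    simp [PySem.List.getElem_enumerate, List.getElem_zip,
      PySem.List.pyGetD_natCast, List.getD_eq_getElem, hk2]

theorem applyA_eq_map (fm : PySem.Dict Int (List (String × String))) (anns : List (List (String × String))) :
    (PySem.List.enumerate anns).foldl
      (fun result p => if fm.contains p.1 then result ++ [fm.getD p.1 []] else result ++ [p.2]) []
      = (PySem.List.enumerate anns).map (fun p => if fm.contains p.1 then fm.getD p.1 [] else p.2) := by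
  have hfun : (fun (result : List (List (String × String))) (p : Int × List (String × String)) =>
      if fm.contains p.1 then result ++ [fm.getD p.1 []] else result ++ [p.2])
      = fun result p => result ++ [if fm.contains p.1 then fm.getD p.1 [] else p.2] := by
    funext r p; split_ifs <;> rfl
  rw [hfun, PySem.List.foldl_append_singleton_eq_map]; rfl

theorem apply_fixes_spec : Claim_equal_apply_fixes := by
  intro anns fi fa _hdom hpre
  unfold Spec_apply_fixes apply_fixes apply_fixes_alt
  simp only [applyA_eq_map]
  apply List.ext_getElem?
  intro j
  rw [getElem?_foldl_set, List.getElem?_map, PySem.List.getElem?_enumerate]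
  cases ha : anns[j]? with
  | none => simp
  | some a =>
    simp only [Option.map_some, Option.map_map]
    congr 1
    simp only [Function.comp, zero_add]
    -- the fix_map lookup is the last matching pair of zip fi fa
    have hget : ((PySem.List.enumerate fi).foldl
        (fun d p => d.insert p.2 (PySem.List.pyGetD fa p.1 [])) PySem.Dict.empty).get? (j : Int)
        = lastFix (fi.zip fa) (j : Int) := by
      have hfold : (PySem.List.enumerate fi).foldl
          (fun d p => d.insert p.2 (PySem.List.pyGetD fa p.1 [])) PySem.Dict.empty
          = ((PySem.List.enumerate fi).map
              (fun p => (p.2, PySem.List.pyGetD fa p.1 []))).foldl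
              (fun d q => d.insert q.1 q.2) PySem.Dict.empty := by
        rw [List.foldl_map]
      rw [hfold, map_enum_eq_zip fi fa [] hpre, get?_foldl_insert_eq_lastFix]
      cases lastFix (fi.zip fa) (j : Int) <;> simp [Option.orElse, PySem.Dict.get?_empty]
    rw [PySem.Dict.getD_eq_get?_getD, PySem.Dict.contains_eq_isSome_get?, hget]
    cases lastFix (fi.zip fa) (j : Int) <;> simp
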